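-- pv_equiv track=rewrite | github.com/nobutakayamauchi/RTS-Design-Research | scripts/validate_decision_block.py | section_lines
-- ===== SOURCE A (Python) =====
-- def section_lines(lines: list[str], section: str) -> list[str]:
--     start = None
--     for index, line in enumerate(lines):
--         if line == f"{section}:":
--             start = index + 1
--             break
--     if start is None:
--         return []
--
--     end = len(lines)
--     for index in range(start, len(lines)):
--         if lines[index] and not lines[index].startswith(" "):
--             end = index
--             break
--     return lines[start:end]
-- ===== SOURCE B (Python) =====
-- def section_lines(lines: list[str], section: str) -> list[str]:
--     header = f"{section}:"
--     out = []
--     collecting = False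
--     for line in lines:
--         if collecting:
--             if line and not line.startswith(" "):
--                 break
--             out.append(line)
--         elif line == header:
--             collecting = True
--     return out
-- ===== Notes on version B (the rewrite author's own statement) =====
-- stated objective: simpler
-- what changed: Replaced the two sequential index-based scans (find header index, find end index, then slice) by one pass over the lines with a 'collecting' boolean state that appends body lines directly, with no index arithmetic or slicing.
import Mathlib
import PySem

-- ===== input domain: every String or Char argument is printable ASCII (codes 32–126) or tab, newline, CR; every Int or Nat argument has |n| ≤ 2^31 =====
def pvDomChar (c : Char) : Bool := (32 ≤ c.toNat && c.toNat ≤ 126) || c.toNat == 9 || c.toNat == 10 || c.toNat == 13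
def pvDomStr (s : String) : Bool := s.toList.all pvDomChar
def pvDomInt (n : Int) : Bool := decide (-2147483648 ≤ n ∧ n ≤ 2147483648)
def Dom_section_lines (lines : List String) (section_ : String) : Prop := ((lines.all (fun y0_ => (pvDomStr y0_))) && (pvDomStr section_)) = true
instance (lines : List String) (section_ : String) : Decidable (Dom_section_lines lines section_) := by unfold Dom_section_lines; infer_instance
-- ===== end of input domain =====

-- B replaces A's two index-based scans plus slice by one pass with a 'collecting' boolean state (objective: simpler).

-- ===== PORT A =====
-- the 'for index, line in enumerate(lines)' loop that finds start = index + 1 (None if absent)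
def sectionA_findStart (header : String) : List String → Nat → Option Nat
  | [], _ => none
  | line :: rest, i => if line = header then some (i + 1) else sectionA_findStart header rest (i + 1)

-- the 'for index in range(start, len(lines))' loop that finds end (len(lines) if no break)
def sectionA_findEnd (lines : List String) (i : Nat) : Nat :=
  if i < lines.length then
    if (PySem.List.pyGetD lines (i : Int) "" != "") && !PySem.Str.startswith (PySem.List.pyGetD lines (i : Int) "") " " then i
    else sectionA_findEnd lines (i + 1)
  else lines.length
termination_by lines.length - i

def section_lines (lines : List String) (section_ : String) : List String :=
  match sectionA_findStart (section_ ++ ":") lines 0 with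
  | none => []
  | some start =>
      PySem.List.slice lines (some (start : Int)) (some ((sectionA_findEnd lines start : Nat) : Int))

-- ===== PORT B =====
-- single pass: while not collecting look for the header; while collecting append until a non-indented non-empty line
def sectionB_loop (header : String) : List String → Bool → List String → List String
  | [], _, out => out
  | line :: rest, collecting, out =>
    if collecting then
      if (line != "") && !PySem.Str.startswith line " " then out
      else sectionB_loop header rest collecting (out ++ [line])
    else if line = header then sectionB_loop header rest true out
    else sectionB_loop header rest collecting out

def section_lines_alt (lines : List String) (section_ : String) : List String :=
  sectionB_loop (section_ ++ ":") lines false []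

-- ===== PRECONDITION & SPEC =====
def Spec_section_lines (lines : List String) (section_ : String) (out : List String) : Prop := out = section_lines_alt lines section_
instance (lines : List String) (section_ : String) (out : List String) : Decidable (Spec_section_lines lines section_ out) := by unfold Spec_section_lines; infer_instance

-- ===== CLAIM (what is proved, stated in full; the proofs are below) =====
def Claim_equal_section_lines : Prop := ∀ (lines : List String) (section_ : String), Dom_section_lines lines section_ → Spec_section_lines lines section_ (section_lines lines section_)

-- ===== LEMMAS AND PROOFS =====

-- the 'stop' test both programs apply to a body line
def pvStop (l : String) : Bool := (l != "") && !PySem.Str.startswith l " "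

-- common reference function: body of the first section with the given header
def pvSpec (header : String) : List String → List String
  | [] => []
  | l :: rest => if l = header then rest.takeWhile (fun x => !pvStop x) else pvSpec header rest

lemma findEnd_ge (lines : List String) (i : Nat) (hle : i ≤ lines.length) :
    i ≤ sectionA_findEnd lines i := by
  fun_induction sectionA_findEnd lines i <;> omega

lemma findEnd_take (lines : List String) (i : Nat) :
    (lines.drop i).take (sectionA_findEnd lines i - i) = (lines.drop i).takeWhile (fun l => !pvStop l) := by
  fun_induction sectionA_findEnd lines i with
  | case1 i hlt hstop =>
      rw [List.drop_eq_getElem_cons hlt]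
      simp only [Nat.sub_self, List.take_zero, List.takeWhile_cons]
      have : pvStop lines[i] = true := by
        simpa [pvStop, PySem.List.pyGetD_natCast, List.getD_eq_getElem?_getD,
          List.getElem?_eq_getElem hlt] using hstop
      simp [this]
  | case2 i hlt hstop ih =>
      have hge := findEnd_ge lines (i + 1) (by omega)
      rw [List.drop_eq_getElem_cons hlt]
      have hns : pvStop lines[i] = false := by
        have := hstop
        simpa [pvStop, PySem.List.pyGetD_natCast, List.getD_eq_getElem?_getD,
          List.getElem?_eq_getElem hlt] using this
      have heq : sectionA_findEnd lines (i + 1) - i = (sectionA_findEnd lines (i + 1) - (i + 1)) + 1 := by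
        omega
      rw [heq, List.take_succ_cons, List.takeWhile_cons, hns]
      simpa using ih
  | case3 i hge =>
      simp [List.drop_eq_nil_of_le (by omega : lines.length ≤ i)]

lemma findStart_shift (header : String) (lines : List String) (i : Nat) :
    sectionA_findStart header lines i = (sectionA_findStart header lines 0).map (· + i) := by
  induction lines generalizing i with
  | nil => simp [sectionA_findStart]
  | cons l rest ih =>
      by_cases h : l = header
      · simp [sectionA_findStart, h, Nat.add_comm]
      · simp only [sectionA_findStart, if_neg h]
        rw [ih (i + 1), ih 1]
        cases sectionA_findStart header rest 0 with
        | none => simp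
        | some s => simp; omega

-- A's result written over the suffix after the header, with the slice already evaluated
def section_lines_core (header : String) (lines : List String) : List String :=
  match sectionA_findStart header lines 0 with
  | none => []
  | some s => (lines.drop s).takeWhile (fun l => !pvStop l)

lemma A_core (lines : List String) (section_ : String) :
    section_lines lines section_ = section_lines_core (section_ ++ ":") lines := by
  unfold section_lines section_lines_core
  cases sectionA_findStart (section_ ++ ":") lines 0 with
  | none => rfl
  | some s =>
      simp only [PySem.List.slice_natCast]
      exact findEnd_take lines s

lemma A_eq_spec (header : String) (lines : List String) :
    section_lines_core header lines = pvSpec header lines := by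
  induction lines with
  | nil => simp [section_lines_core, sectionA_findStart, pvSpec]
  | cons l rest ih =>
      by_cases h : l = header
      · simp [section_lines_core, sectionA_findStart, h, pvSpec]
      · simp only [section_lines_core, sectionA_findStart, if_neg h, pvSpec]
        rw [findStart_shift header rest 1]
        rw [show section_lines_core header rest = _ from rfl] at ih
        cases hs : sectionA_findStart header rest 0 with
        | none => simpa [section_lines_core, hs, if_neg h] using ih
        | some s =>
            simp only [Option.map_some]
            simpa [section_lines_core, hs, if_neg h, List.drop_succ_cons] using ih

lemma B_collect (header : String) (xs : List String) :
    ∀ out, sectionB_loop header xs true out = out ++ xs.takeWhile (fun l => !pvStop l) := by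
  induction xs with
  | nil => simp [sectionB_loop]
  | cons x rest ih =>
      intro out
      have hc : ((x != "") && !PySem.Str.startswith x " ") = pvStop x := rfl
      cases h : pvStop x with
      | true => simp only [sectionB_loop, hc, h]; simp [h]
      | false => simp only [sectionB_loop, hc, h]; simp [h, ih]

lemma B_eq_spec (header : String) (lines : List String) :
    sectionB_loop header lines false [] = pvSpec header lines := by
  induction lines with
  | nil => simp [sectionB_loop, pvSpec]
  | cons l rest ih =>
      by_cases h : l = header
      · simp [sectionB_loop, h, pvSpec, B_collect]
      · simp [sectionB_loop, h, pvSpec, ih]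

-- ===== VERDICT (by name: the statement is the Claim_ definition above) =====
theorem section_lines_spec : Claim_equal_section_lines := by
  intro lines section_ _
  unfold Spec_section_lines section_lines_alt
  rw [A_core, A_eq_spec, B_eq_spec]
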